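-- pv_equiv track=rewrite | github.com/Shenss-uu/S-AES | s_aes.py | string_to_blocks
-- ===== SOURCE A (Python) =====
-- def string_to_blocks(text):
--     """
--     将字符串转换为16位块列表
--     """
--     text_bytes = text.encode('utf-8')
--     blocks = []
--
--     for i in range(0, len(text_bytes), 2):
--         if i + 1 < len(text_bytes):
--             block = (text_bytes[i] << 8) | text_bytes[i + 1]
--         else:
--             # 奇数个字节时，最后一个字节后补0
--             block = (text_bytes[i] << 8)
--         blocks.append(block)
--
--     return blocks
-- ===== SOURCE B (Python) =====
-- def string_to_blocks(text):
--     """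
--     将字符串转换为16位块列表
--     (pad-then-bulk-pair: normalize to even length, then pair adjacent bytes)
--     """
--     data = list(text.encode('utf-8'))
--     if len(data) % 2 == 1:
--         data.append(0)
--     it = iter(data)
--     return [hi * 256 + lo for hi, lo in zip(it, it)]
-- ===== Notes on version B (the rewrite author's own statement) =====
-- stated objective: idiomatic
-- what changed: Instead of an index loop with an inner odd/even branch and bit operations per element, B normalizes the buffer first (append one 0x00 byte if the byte length is odd) and then pairs adjacent bytes in one bulk pass (zip of one iterator with itself), so there is no per-element branch.
import Mathlib
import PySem

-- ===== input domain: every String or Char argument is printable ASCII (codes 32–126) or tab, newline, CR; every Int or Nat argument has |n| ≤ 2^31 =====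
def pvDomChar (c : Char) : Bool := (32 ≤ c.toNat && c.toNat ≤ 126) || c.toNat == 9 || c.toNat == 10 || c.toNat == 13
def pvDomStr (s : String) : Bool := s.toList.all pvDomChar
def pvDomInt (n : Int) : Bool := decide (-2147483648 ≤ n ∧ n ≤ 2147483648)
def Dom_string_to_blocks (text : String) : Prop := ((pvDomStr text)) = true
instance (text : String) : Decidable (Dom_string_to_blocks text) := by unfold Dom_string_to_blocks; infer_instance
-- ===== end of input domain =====

-- B replaces A's index loop with its inner odd/even branch by a normalize-then-bulk-pair pass (pad one 0x00 byte if the length is odd, then pair adjacent bytes); same O(n) cost, plainer shape.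


-- ===== PORT A =====
-- text.encode('utf-8'): on Dom every character is ASCII, so the UTF-8 bytes are exactly the code points (exact on the stated ASCII domain).
def string_to_blocks (text : String) : List Int :=
  let textBytes : List Int := text.toList.map (fun c => (c.toNat : Int))
  (PySem.List.pyRange 0 (textBytes.length : Int) 2).foldl
    (fun blocks i =>
      blocks ++
        [if i + 1 < (textBytes.length : Int) then
            PySem.Int.bor (PySem.List.pyGetD textBytes i 0 <<< 8) (PySem.List.pyGetD textBytes (i + 1) 0)
          else
            PySem.List.pyGetD textBytes i 0 <<< 8]) []

-- ===== PORT B =====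
-- the zip(it, it) bulk pairing: consume the (even-length) buffer two bytes at a time
def pvPairs : List Int → List Int
  | a :: b :: rest => (a * 256 + b) :: pvPairs rest
  | _ => []

def string_to_blocks_alt (text : String) : List Int :=
  let data : List Int := text.toList.map (fun c => (c.toNat : Int))
  let padded := if data.length % 2 == 1 then data ++ [0] else data
  pvPairs padded

-- ===== PRECONDITION & SPEC =====
def Spec_string_to_blocks (text : String) (out : List Int) : Prop := out = string_to_blocks_alt text
instance (text : String) (out : List Int) : Decidable (Spec_string_to_blocks text out) := by unfold Spec_string_to_blocks; infer_instance

-- ===== CLAIM (what is proved, stated in full; the proofs are below) =====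
def Claim_equal_string_to_blocks : Prop := ∀ (text : String), Dom_string_to_blocks text → Spec_string_to_blocks text (string_to_blocks text)

-- ===== LEMMAS AND PROOFS =====


lemma pyRange_two_cons (a b : Int) (h : a < b) :
    PySem.List.pyRange a b 2 = a :: PySem.List.pyRange (a + 2) b 2 := by
  rw [PySem.List.pyRange_of_pos a b (by norm_num), PySem.List.pyRange_of_pos (a+2) b (by norm_num)]
  by_cases h2 : a + 2 < b
  · rw [if_pos h, if_pos h2]
    have he : ((b - a + 2 - 1) / 2).toNat = ((b - (a + 2) + 2 - 1) / 2).toNat + 1 := by omega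
    rw [he, List.range_succ_eq_map]
    simp only [List.map_cons, List.map_map]
    congr 1
    · simp
    · apply List.map_congr_left
      intro k _
      simp [Function.comp, Nat.succ_eq_add_one]
      ring
  · rw [if_pos h, if_neg h2]
    have he : ((b - a + 2 - 1) / 2).toNat = 1 := by omega
    rw [he]
    simp

lemma bor_shift256 (a b : Int) (ha : 0 ≤ a) (hb0 : 0 ≤ b) (hb : b < 256) :
    PySem.Int.bor (a <<< 8) b = a * 256 + b := by
  obtain ⟨m, rfl⟩ := Int.eq_ofNat_of_zero_le ha
  obtain ⟨n, rfl⟩ := Int.eq_ofNat_of_zero_le hb0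
  have hn : n < 256 := by exact_mod_cast hb
  have h1 : ((m : Int) <<< (8 : Int)) = ((m <<< 8 : Nat) : Int) := by
    have := Int.shiftLeft_natCast m 8
    simpa using this
  rw [h1, PySem.Int.bor_natCast]
  have h2 : m <<< 8 ||| n = m * 256 + n := by
    rw [← Nat.shiftLeft_add_eq_or_of_lt (by omega : n < 2 ^ 8) m]
    rw [Nat.shiftLeft_eq]
  rw [h2]; push_cast; ring

lemma getD_append_at (pre : List Int) (a : Int) (t : List Int) :
    PySem.List.pyGetD (pre ++ a :: t) (pre.length : Int) 0 = a := by
  rw [PySem.List.pyGetD_eq_getElem _ _ (by positivity) (by simp)]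
  simp

lemma loopA_eq (bs : List Int) : ∀ (pre acc : List Int),
    (∀ x ∈ bs, 0 ≤ x ∧ x < 256) →
    (PySem.List.pyRange (pre.length : Int) (((pre ++ bs).length : Nat) : Int) 2).foldl
      (fun blocks i =>
        blocks ++
          [if i + 1 < (((pre ++ bs).length : Nat) : Int) then
              PySem.Int.bor (PySem.List.pyGetD (pre ++ bs) i 0 <<< 8) (PySem.List.pyGetD (pre ++ bs) (i + 1) 0)
            else
              PySem.List.pyGetD (pre ++ bs) i 0 <<< 8]) acc
      = acc ++ pvPairs (if bs.length % 2 == 1 then bs ++ [0] else bs) := by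
  induction bs using pvPairs.induct with
  | case1 a b rest ih =>
    intro pre acc hb
    have hlen : ((pre ++ a :: b :: rest).length : Int) = pre.length + (2 + rest.length) := by
      simp; ring
    rw [hlen]
    have hcons : PySem.List.pyRange (pre.length : Int) (pre.length + (2 + rest.length)) 2
        = (pre.length : Int) :: PySem.List.pyRange ((pre.length : Int) + 2) (pre.length + (2 + rest.length)) 2 := by
      apply pyRange_two_cons
      omega
    rw [hcons]
    simp only [List.foldl_cons]
    have hif : ((pre.length : Int) + 1 < (pre.length : Int) + (2 + rest.length)) := by
      omega
    rw [if_pos hif]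
    have hga : PySem.List.pyGetD (pre ++ a :: b :: rest) (pre.length : Int) 0 = a :=
      getD_append_at pre a (b :: rest)
    have hgb : PySem.List.pyGetD (pre ++ a :: b :: rest) ((pre.length : Int) + 1) 0 = b := by
      have : pre ++ a :: b :: rest = (pre ++ [a]) ++ b :: rest := by simp
      rw [this]
      have h2 : ((pre.length : Int) + 1) = (((pre ++ [a]).length : Nat) : Int) := by simp
      rw [h2]
      exact getD_append_at (pre ++ [a]) b rest
    rw [hga, hgb]
    obtain ⟨ha0, ha255⟩ := hb a (by simp)
    obtain ⟨hb0', hb255⟩ := hb b (by simp)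
    rw [bor_shift256 a b ha0 hb0' hb255]
    -- rewrite the rest as the IH instance with pre' = pre ++ [a, b]
    have hpre' : ((pre.length : Int) + 2) = (((pre ++ [a, b]).length : Nat) : Int) := by simp
    have hfull : pre ++ a :: b :: rest = (pre ++ [a, b]) ++ rest := by simp
    have hlen2 : ((pre.length : Int) + (2 + rest.length)) = ((((pre ++ [a, b]) ++ rest).length : Nat) : Int) := by
      simp
      ring
    rw [hpre', hlen2, hfull]
    rw [ih (pre ++ [a, b]) (acc ++ [a * 256 + b]) (fun x hx => hb x (by simp [hx]))]
    have hpad : (if ((a :: b :: rest).length % 2 == 1) then (a :: b :: rest) ++ [0] else (a :: b :: rest))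
        = a :: b :: (if (rest.length % 2 == 1) then rest ++ [0] else rest) := by
      by_cases hp : rest.length % 2 = 1
      · have : (a :: b :: rest).length % 2 = 1 := by simp [List.length_cons]; omega
        simp [hp]; omega
      · have : ¬ ((a :: b :: rest).length % 2 = 1) := by simp [List.length_cons]; omega
        simp [hp]; omega
    rw [hpad]
    simp [pvPairs]
  | case2 x hx =>
    intro pre acc hb
    match x, hx with
    | [], _ =>
      have hr : PySem.List.pyRange (pre.length : Int) (((pre ++ ([] : List Int)).length : Nat) : Int) 2 = [] := by
        rw [PySem.List.pyRange_of_pos _ _ (by norm_num)]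
        simp
      rw [hr]
      simp [pvPairs]
    | [a], _ =>
      obtain ⟨ha0, ha255⟩ := hb a (by simp)
      have hlen : (((pre ++ [a]).length : Nat) : Int) = (pre.length : Int) + 1 := by simp
      rw [hlen]
      have hcons : PySem.List.pyRange (pre.length : Int) ((pre.length : Int) + 1) 2
          = [(pre.length : Int)] := by
        rw [pyRange_two_cons _ _ (by omega)]
        rw [PySem.List.pyRange_of_pos _ _ (by norm_num)]
        rw [if_neg (by omega)]
        simp
      rw [hcons]
      simp only [List.foldl_cons, List.foldl_nil]
      rw [if_neg (by omega)]
      rw [getD_append_at pre a []]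
      have hsh : a <<< (8 : Int) = a * 256 := by
        have h := bor_shift256 a 0 ha0 (le_refl 0) (by norm_num)
        simpa using h
      rw [hsh]
      simp [pvPairs]
    | a :: b :: t, hx => exact (hx a b t rfl).elim

-- ===== VERDICT (by name: the statement is the Claim_ definition above) =====
theorem string_to_blocks_spec : Claim_equal_string_to_blocks := by
  intro text hdom
  unfold Spec_string_to_blocks string_to_blocks string_to_blocks_alt
  have hb : ∀ x ∈ text.toList.map (fun c => ((c.toNat : Int))), 0 ≤ x ∧ x < 256 := by
    intro x hx
    obtain ⟨c, hc, rfl⟩ := List.mem_map.1 hx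
    have hall := List.all_eq_true.1 hdom c hc
    simp [pvDomChar] at hall
    have hlt : c.toNat < 256 := by omega
    exact ⟨by positivity, by exact_mod_cast hlt⟩
  have h := loopA_eq (text.toList.map (fun c => ((c.toNat : Int)))) [] [] hb
  simpa using h
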